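-- pv_equiv track=rewrite | github.com/dript7026-create/dr-pTECH | KaijuGaiden/tools/aiasmr_renderer.py | mix_layers
-- ===== SOURCE A (Python) =====
-- def clamp_sample(value: float) -> int:
--     if value > 32767.0:
--         return 32767
--     if value < -32768.0:
--         return -32768
--     return int(value)
--
-- def mix_layers(layer_buffers: list[tuple[list[int], list[int]]]) -> tuple[list[int], list[int]]:
--     if not layer_buffers:
--         return [0], [0]
--     frame_count = len(layer_buffers[0][0])
--     left = [0] * frame_count
--     right = [0] * frame_count
--     for layer_left, layer_right in layer_buffers:
--         for index in range(frame_count):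
--             left[index] = clamp_sample(left[index] + layer_left[index])
--             right[index] = clamp_sample(right[index] + layer_right[index])
--     return left, right
-- ===== SOURCE B (Python) =====
-- def clamp_sample(value: float) -> int:
--     if value > 32767.0:
--         return 32767
--     if value < -32768.0:
--         return -32768
--     return int(value)
--
-- def _saturating_sum(xs):
--     # Closed form of iterated saturation: folding clamp_sample(acc + x) over xs
--     # from 0 composes the maps a -> clamp(a + x); the composite of such maps is
--     # always a -> max(L, min(H, a + s)), so we maintain only (s, L, H) and
--     # evaluate the composite at 0 once.
--     s = xs[0]
--     L = -32768
--     H = 32767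
--     for x in xs[1:]:
--         s += x
--         L = clamp_sample(L + x)
--         H = clamp_sample(H + x)
--     return max(L, min(H, s))
--
-- def mix_layers(layer_buffers: list[tuple[list[int], list[int]]]) -> tuple[list[int], list[int]]:
--     if not layer_buffers:
--         return [0], [0]
--     frame_count = len(layer_buffers[0][0])
--     left = [_saturating_sum([lb[0][i] for lb in layer_buffers]) for i in range(frame_count)]
--     right = [_saturating_sum([lb[1][i] for lb in layer_buffers]) for i in range(frame_count)]
--     return left, right
-- ===== Notes on version B (the rewrite author's own statement) =====
-- stated objective: alternative
-- what changed: Replaces iterated per-layer clamping with a closed form: per frame it composes the saturating-add maps a->clamp(a+x) into a single map max(L, min(H, a+s)) by maintaining only a running (sum, low, high) triple, then evaluates that composite at 0, instead of mutating two full running arrays layer by layer.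
import Mathlib
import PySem

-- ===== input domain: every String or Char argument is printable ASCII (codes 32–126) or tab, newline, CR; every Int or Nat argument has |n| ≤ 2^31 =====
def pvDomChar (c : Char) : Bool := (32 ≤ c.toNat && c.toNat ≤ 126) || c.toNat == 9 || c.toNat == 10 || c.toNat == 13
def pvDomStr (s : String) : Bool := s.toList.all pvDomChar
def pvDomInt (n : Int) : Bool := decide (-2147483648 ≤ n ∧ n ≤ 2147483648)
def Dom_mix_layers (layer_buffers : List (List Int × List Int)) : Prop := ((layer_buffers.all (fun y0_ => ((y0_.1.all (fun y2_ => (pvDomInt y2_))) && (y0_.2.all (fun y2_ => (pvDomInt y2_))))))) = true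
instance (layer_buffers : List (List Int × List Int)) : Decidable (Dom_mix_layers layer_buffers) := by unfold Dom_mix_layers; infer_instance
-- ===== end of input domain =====

-- B replaces A's layer-by-layer array sweeps with a per-frame closed form: the saturating-add
-- maps a ↦ clamp(a+x) are composed into one map max(L, min(H, a+s)); objective: alternative.

-- ===== PORT A =====
def clampSample (value : Int) : Int :=
  if value > 32767 then 32767
  else if value < -32768 then -32768
  else value

def mix_layers (layer_buffers : List (List Int × List Int)) : List Int × List Int :=
  match layer_buffers with
  | [] => ([0], [0])
  | first :: _ =>
    let frame_count := first.1.length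
    layer_buffers.foldl
      (fun lr layer =>
        (PySem.List.pyRange 0 (frame_count : Int) 1).foldl
          (fun lr idx =>
            (lr.1.set idx.toNat
                (clampSample (PySem.List.pyGetD lr.1 idx 0 + PySem.List.pyGetD layer.1 idx 0)),
             lr.2.set idx.toNat
                (clampSample (PySem.List.pyGetD lr.2 idx 0 + PySem.List.pyGetD layer.2 idx 0))))
          lr)
      (List.replicate frame_count 0, List.replicate frame_count 0)

-- ===== PORT B =====
-- transliteration of _saturating_sum; xs is non-empty at every call site (Python's xs[0]
-- would raise IndexError on []), so headD/drop 1 are exact for xs[0]/xs[1:]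
def satSum (xs : List Int) : Int :=
  let s0 := xs.headD 0
  let t := (xs.drop 1).foldl
      (fun p x => (p.1 + x, clampSample (p.2.1 + x), clampSample (p.2.2 + x)))
      (s0, (-32768 : Int), (32767 : Int))
  max t.2.1 (min t.2.2 t.1)

-- lb[0][i]/lb[1][i]: i is in range under Pre_, so getD is exact there
def mix_layers_alt (layer_buffers : List (List Int × List Int)) : List Int × List Int :=
  match layer_buffers with
  | [] => ([0], [0])
  | first :: _ =>
    let frame_count := first.1.length
    ((List.range frame_count).map
        (fun i => satSum (layer_buffers.map (fun lb => lb.1.getD i 0))),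
     (List.range frame_count).map
        (fun i => satSum (layer_buffers.map (fun lb => lb.2.getD i 0))))

-- ===== PRECONDITION & SPEC =====
-- Pre_ excludes ragged inputs: Python A raises IndexError when some layer's left or right
-- buffer is shorter than the first layer's left buffer (frame_count).
def Pre_mix_layers (layer_buffers : List (List Int × List Int)) : Prop :=
  ∀ p ∈ layer_buffers, ∀ q ∈ layer_buffers.head?,
    q.1.length ≤ p.1.length ∧ q.1.length ≤ p.2.length

instance (layer_buffers : List (List Int × List Int)) : Decidable (Pre_mix_layers layer_buffers) := by
  unfold Pre_mix_layers; infer_instance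

def pvWitness_mix_layers : (List (List Int × List Int)) := [([1, 2], [3, 4]), ([5, 6], [7, 8])]

def Spec_mix_layers (layer_buffers : List (List Int × List Int)) (out : List Int × List Int) : Prop := out = mix_layers_alt layer_buffers
instance (layer_buffers : List (List Int × List Int)) (out : List Int × List Int) : Decidable (Spec_mix_layers layer_buffers out) := by unfold Spec_mix_layers; infer_instance

-- ===== CLAIM (what is proved, stated in full; the proofs are below) =====
def Claim_equal_mix_layers : Prop := ∀ (layer_buffers : List (List Int × List Int)), Dom_mix_layers layer_buffers → Pre_mix_layers layer_buffers → Spec_mix_layers layer_buffers (mix_layers layer_buffers)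

-- ===== LEMMAS AND PROOFS =====

theorem pair_foldl {α β γ : Type} (f : α → γ → α) (g : β → γ → β) :
    ∀ (xs : List γ) (a : α) (b : β),
      xs.foldl (fun p c => (f p.1 c, g p.2 c)) (a, b) = (xs.foldl f a, xs.foldl g b) := by
  intro xs
  induction xs with
  | nil => intro a b; rfl
  | cons x xs ih => intro a b; simpa using ih (f a x) (g b x)

-- the in-place index sweep 'for i in range(len(l)): l[i] = f(i, l[i])' is mapIdx-with-offset
theorem set_fold (f : Nat → Int → Int) :
    ∀ (l p : List Int),
      (List.range' p.length l.length 1).foldl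
        (fun a i => a.set i (f i (a.getD i 0))) (p ++ l)
      = p ++ (l.zipIdx p.length).map (fun x => f x.2 x.1) := by
  intro l
  induction l with
  | nil => intro p; simp
  | cons x xs ih =>
    intro p
    have hset : (p ++ x :: xs).set p.length (f p.length ((p ++ x :: xs).getD p.length 0))
        = p ++ f p.length x :: xs := by
      simp [List.getD]
    simp only [List.length_cons, List.range'_succ, List.foldl_cons]
    rw [hset]
    have h2 : p ++ f p.length x :: xs = (p ++ [f p.length x]) ++ xs := by simp
    rw [h2]
    have hlen : p.length + 1 = (p ++ [f p.length x]).length := by simp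
    rw [hlen, ih (p ++ [f p.length x])]
    simp [List.zipIdx_cons]

theorem set_fold_zero (f : Nat → Int → Int) (l : List Int) :
    (List.range l.length).foldl (fun a i => a.set i (f i (a.getD i 0))) l
      = l.zipIdx.map (fun x => f x.2 x.1) := by
  have := set_fold f l []
  simpa [List.range_eq_range'] using this

theorem zipIdx_map_zipIdx {α β : Type} (u : α × Nat → β) :
    ∀ (l : List (α × Nat)) (n : Nat) (_ : ∀ i (h : i < l.length), l[i].2 = n + i),
      (l.map u).zipIdx n = l.map (fun x => (u x, x.2)) := by
  intro l
  induction l with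
  | nil => intro n _; rfl
  | cons a as ih =>
    intro n hl
    have ha : a.2 = n := by simpa using hl 0 (by simp)
    have has : ∀ i (h : i < as.length), as[i].2 = (n + 1) + i := by
      intro i h
      have := hl (i + 1) (by simpa using Nat.succ_lt_succ h)
      simpa [Nat.add_assoc, Nat.add_comm 1 i] using this
    simp [List.zipIdx_cons, ha, ih (n + 1) has]

theorem zipIdx_map_zipIdx_zero {α β : Type} (u : α × Nat → β) (l : List α) :
    ((l.zipIdx.map u)).zipIdx = l.zipIdx.map (fun x => (u x, x.2)) := by
  refine zipIdx_map_zipIdx u l.zipIdx 0 ?_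
  intro i h
  have hi : i < l.length := by simpa using h
  simp [List.getElem_zipIdx]

-- folding A's per-layer sweeps over the whole layer list, expressed per index
theorem sweep_char (sel : List Int × List Int → List Int) (fc : Nat) :
    ∀ (layers : List (List Int × List Int)) (l : List Int), l.length = fc →
      layers.foldl
        (fun a layer => (List.range fc).foldl
          (fun a k => a.set k (clampSample (a.getD k 0 + (sel layer).getD k 0))) a) l
      = l.zipIdx.map
          (fun x => layers.foldl (fun acc layer => clampSample (acc + (sel layer).getD x.2 0)) x.1) := by
  intro layers
  induction layers with
  | nil => intro l _; simp
  | cons L rest ih =>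
    intro l hl
    rw [List.foldl_cons]
    have h1 : (List.range fc).foldl
        (fun a k => a.set k (clampSample (a.getD k 0 + (sel L).getD k 0))) l
        = l.zipIdx.map (fun x => clampSample (x.1 + (sel L).getD x.2 0)) := by
      rw [← hl]
      exact set_fold_zero (fun i v => clampSample (v + (sel L).getD i 0)) l
    rw [h1, ih _ (by simpa using hl)]
    rw [zipIdx_map_zipIdx_zero (fun x => clampSample (x.1 + (sel L).getD x.2 0)) l]
    rw [List.map_map]
    rfl

theorem replicate_zipIdx (v : Int) : ∀ (n s : Nat),
    (List.replicate n v).zipIdx s = (List.range' s n 1).map (fun i => (v, i)) := by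
  intro n
  induction n with
  | zero => intro s; simp
  | succ m ih => intro s; simp [List.replicate_succ, List.zipIdx_cons, ih, List.range']

-- one composition step: clamp-after-add applied to the composite max(L, min(H, ·+s))
theorem clamp_comp_step (L H t x : Int) (hL : -32768 ≤ L) (hLH : L ≤ H) (hH : H ≤ 32767) :
    clampSample (max L (min H t) + x)
      = max (clampSample (L + x)) (min (clampSample (H + x)) (t + x)) := by
  unfold clampSample
  split_ifs <;> omega

theorem clampSample_bounds (v : Int) : -32768 ≤ clampSample v ∧ clampSample v ≤ 32767 := by
  unfold clampSample; split_ifs <;> omega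

-- the (s, L, H) triple fold computes iterated clamping
theorem sat_fold : ∀ (rest : List Int) (s L H : Int),
    -32768 ≤ L → L ≤ H → H ≤ 32767 →
    rest.foldl (fun a x => clampSample (a + x)) (max L (min H s))
      = (fun t : Int × Int × Int => max t.2.1 (min t.2.2 t.1))
          (rest.foldl
            (fun p x => (p.1 + x, clampSample (p.2.1 + x), clampSample (p.2.2 + x)))
            (s, L, H)) := by
  intro rest
  induction rest with
  | nil => intro s L H _ _ _; rfl
  | cons x xs ih =>
    intro s L H hL hLH hH
    simp only [List.foldl_cons]
    rw [clamp_comp_step L H s x hL hLH hH]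
    exact ih (s + x) (clampSample (L + x)) (clampSample (H + x))
      (clampSample_bounds (L + x)).1
      (by unfold clampSample; split_ifs <;> omega)
      (clampSample_bounds (H + x)).2

theorem satSum_foldl (x : Int) (rest : List Int) :
    satSum (x :: rest) = (x :: rest).foldl (fun a y => clampSample (a + y)) 0 := by
  unfold satSum
  simp only [List.headD_cons, List.drop_one, List.tail_cons, List.foldl_cons]
  have h0 : clampSample (0 + x) = max (-32768 : Int) (min (32767 : Int) x) := by
    unfold clampSample; split_ifs <;> omega
  rw [h0, sat_fold rest x (-32768) 32767 (by omega) (by omega) (by omega)]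

theorem mix_layers_spec : Claim_equal_mix_layers := by
  intro lbs _ _
  unfold Spec_mix_layers
  cases lbs with
  | nil => rfl
  | cons first rest =>
    simp only [mix_layers, mix_layers_alt]
    -- B side: satSum over each index column is the iterated clamped fold over the layers
    have hB : ∀ (sel : List Int × List Int → List Int) (i : Nat),
        satSum ((first :: rest).map (fun lb => (sel lb).getD i 0))
          = (first :: rest).foldl (fun acc lb => clampSample (acc + (sel lb).getD i 0)) 0 := by
      intro sel i
      rw [List.map_cons, satSum_foldl, show ((sel first).getD i 0 :: List.map (fun lb => (sel lb).getD i 0) rest) = (first :: rest).map (fun lb => (sel lb).getD i 0) from rfl, List.foldl_map]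
    simp only [hB (fun lb => lb.1), hB (fun lb => lb.2)]
    -- A side: per layer, convert the Int index sweep into a Nat sweep over both components
    rw [PySem.List.pyRange_zero_nat first.1.length]
    have hstep : ∀ (lr layer : List Int × List Int),
        (List.map (fun (k : Nat) => (k : Int)) (List.range first.1.length)).foldl
          (fun lr idx =>
            (lr.1.set idx.toNat
               (clampSample (PySem.List.pyGetD lr.1 idx 0 + PySem.List.pyGetD layer.1 idx 0)),
             lr.2.set idx.toNat
               (clampSample (PySem.List.pyGetD lr.2 idx 0 + PySem.List.pyGetD layer.2 idx 0))))
          lr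
        = ((List.range first.1.length).foldl (fun a k =>
             a.set k (clampSample (a.getD k 0 + layer.1.getD k 0))) lr.1,
           (List.range first.1.length).foldl (fun a k =>
             a.set k (clampSample (a.getD k 0 + layer.2.getD k 0))) lr.2) := by
      intro lr layer
      rw [List.foldl_map]
      simp only [PySem.List.pyGetD_natCast, Int.toNat_natCast]
      exact pair_foldl
        (fun a k => a.set k (clampSample (a.getD k 0 + layer.1.getD k 0)))
        (fun a k => a.set k (clampSample (a.getD k 0 + layer.2.getD k 0)))
        (List.range first.1.length) lr.1 lr.2
    have hstepf : (fun (lr layer : List Int × List Int) =>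
        (List.map (fun (k : Nat) => (k : Int)) (List.range first.1.length)).foldl
          (fun lr idx =>
            (lr.1.set idx.toNat
               (clampSample (PySem.List.pyGetD lr.1 idx 0 + PySem.List.pyGetD layer.1 idx 0)),
             lr.2.set idx.toNat
               (clampSample (PySem.List.pyGetD lr.2 idx 0 + PySem.List.pyGetD layer.2 idx 0))))
          lr)
        = (fun (lr layer : List Int × List Int) =>
           ((List.range first.1.length).foldl (fun a k =>
              a.set k (clampSample (a.getD k 0 + layer.1.getD k 0))) lr.1,
            (List.range first.1.length).foldl (fun a k =>
              a.set k (clampSample (a.getD k 0 + layer.2.getD k 0))) lr.2)) := by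
      funext lr layer; exact hstep lr layer
    rw [hstepf]
    rw [pair_foldl
      (fun a layer => (List.range first.1.length).foldl (fun a k =>
        a.set k (clampSample (a.getD k 0 + layer.1.getD k 0))) a)
      (fun a layer => (List.range first.1.length).foldl (fun a k =>
        a.set k (clampSample (a.getD k 0 + layer.2.getD k 0))) a)
      (first :: rest) (List.replicate first.1.length 0) (List.replicate first.1.length 0)]
    rw [sweep_char (fun layer => layer.1) first.1.length (first :: rest)
        (List.replicate first.1.length 0) (by simp),
       sweep_char (fun layer => layer.2) first.1.length (first :: rest)
        (List.replicate first.1.length 0) (by simp)]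
    rw [replicate_zipIdx 0 first.1.length 0, List.map_map, List.map_map]
    rw [List.range_eq_range']
    rfl
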